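-- pv_equiv track=rewrite | github.com/origin1508/algorithm | 프로그래머스/unrated/140108. 문자열 나누기/문자열 나누기.py | solution
-- ===== SOURCE A (Python) =====
-- def solution(s):
--     split = []
--     answer = 0
--     str = ""
--     for i in s:
--         str += i
--         if len(str) == 2 * str.count(str[0]):
--             split.append(str)
--             str = ""
--
--     if len(str) > 0:
--         split.append(str)
--
--     answer = len(split)
--     return answer
-- ===== SOURCE B (Python) =====
-- def solution(s):
--     # Index-based two-level scan: for each chunk start i, walk j forward keeping a
--     # signed balance (+1 first char, -1 other) until it hits 0, then jump to j+1.
--     n = len(s)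
--     answer = 0
--     i = 0
--     while i < n:
--         first = s[i]
--         bal = 0
--         j = i
--         while j < n:
--             bal += 1 if s[j] == first else -1
--             if bal == 0:
--                 break
--             j += 1
--         answer += 1
--         i = j + 1
--     return answer
-- ===== Notes on version B (the rewrite author's own statement) =====
-- stated objective: faster
-- what changed: Replaces A's growing string buffer rescanned with str.count at every character by index-based nested loops: an outer loop over chunk starts and an inner scan that advances a single signed balance counter until it returns to zero, jumping straight to the next chunk.
import Mathlib
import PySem

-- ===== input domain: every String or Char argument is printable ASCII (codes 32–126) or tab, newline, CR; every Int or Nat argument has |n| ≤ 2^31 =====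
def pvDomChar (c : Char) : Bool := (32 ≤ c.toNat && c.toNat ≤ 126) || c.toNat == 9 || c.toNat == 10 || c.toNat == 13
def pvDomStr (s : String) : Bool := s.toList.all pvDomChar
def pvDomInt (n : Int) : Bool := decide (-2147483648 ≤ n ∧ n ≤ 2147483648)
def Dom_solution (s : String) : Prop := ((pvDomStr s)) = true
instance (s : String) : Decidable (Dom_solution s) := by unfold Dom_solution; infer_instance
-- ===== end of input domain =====

-- B replaces A's growing buffer rescanned with str.count at every step by index-based
-- nested loops: an inner scan moving a signed balance counter to its zero, then a jump.

-- ===== PORT A =====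
-- one loop iteration of A: extend the buffer, cut it off when balanced
def aStep (st : List (List Char) × List Char) (i : Char) : List (List Char) × List Char :=
  let str := st.2 ++ [i]
  -- str is nonempty here, so Python's str[0] is its head (the headD default is never used)
  if str.length = 2 * str.count (str.headD ' ') then (st.1 ++ [str], []) else (st.1, str)

def solution (s : String) : Int :=
  let fin := s.toList.foldl aStep ([], [])
  let split := if fin.2.length > 0 then fin.1 ++ [fin.2] else fin.1
  (split.length : Int)

-- ===== PORT B =====
-- inner while loop of B: advance j, updating the signed balance, until it hits 0
-- (Python's break, returning the current j) or j reaches len(s) (loop falls through);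
-- fuel only makes the while loop total (s.length + 1 steps always suffice).
-- j < s.length guards every access, so s.getD j ' ' is exactly Python's s[j].
def bInner (s : List Char) (first : Char) (bal : Int) (j : Nat) : Nat → Nat
  | 0 => j
  | fuel + 1 =>
    if j < s.length then
      let bal' := if s.getD j ' ' = first then bal + 1 else bal - 1
      if bal' = 0 then j else bInner s first bal' (j + 1) fuel
    else j

-- outer while loop of B over the chunk-start index i, accumulating answer
def bOuter (s : List Char) (answer : Int) (i : Nat) : Nat → Int
  | 0 => answer
  | fuel + 1 =>
    if i < s.length then
      let first := s.getD i ' '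
      bOuter s (answer + 1) (bInner s first 0 i (s.length + 1) + 1) fuel
    else answer

def solution_alt (s : String) : Int := bOuter s.toList 0 0 (s.toList.length + 1)

-- ===== PRECONDITION & SPEC =====
def Spec_solution (s : String) (out : Int) : Prop := out = solution_alt s
instance (s : String) (out : Int) : Decidable (Spec_solution s out) := by unfold Spec_solution; infer_instance

-- ===== CLAIM (what is proved, stated in full; the proofs are below) =====
def Claim_equal_solution : Prop := ∀ (s : String), Dom_solution s → Spec_solution s (solution s)

-- ===== LEMMAS AND PROOFS =====

-- signed balance of a buffer with respect to its first character f
def balOf (f : Char) (str : List Char) : Int := 2 * (str.count f : Int) - str.length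

-- cut offset of the inner scan, phrased over the remaining suffix
def aux (f : Char) (bal : Int) : List Char → Nat
  | [] => 0
  | c :: rest =>
    let bal' := if c = f then bal + 1 else bal - 1
    if bal' = 0 then 0 else 1 + aux f bal' rest

-- reference chunk count over a suffix
def solSpec : List Char → Int
  | [] => 0
  | c :: rest => 1 + solSpec ((c :: rest).drop (aux c 0 (c :: rest) + 1))
termination_by cs => cs.length
decreasing_by simp [aux]

lemma solSpec_nil : solSpec [] = 0 := by unfold solSpec; rfl

lemma solSpec_cons (c : Char) (r : List Char) :
    solSpec (c :: r) = 1 + solSpec ((c :: r).drop (aux c 0 (c :: r) + 1)) := by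
  conv_lhs => rw [solSpec.eq_def]

lemma aux_cons (f c : Char) (bal : Int) (rest : List Char) :
    aux f bal (c :: rest)
      = if (if c = f then bal + 1 else bal - 1) = 0 then 0
        else 1 + aux f (if c = f then bal + 1 else bal - 1) rest := by
  simp only [aux]

lemma getD_of_drop (s : List Char) (j : Nat) (c : Char) (r : List Char)
    (h : s.drop j = c :: r) : s.getD j ' ' = c := by
  have h2 : (List.drop j s)[0]? = s[j + 0]? := List.getElem?_drop
  rw [h] at h2
  simp at h2
  simp [List.getD_eq_getElem?_getD, ← h2]

lemma drop_ne_nil_lt (s : List Char) (j : Nat) (c : Char) (r : List Char)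
    (h : s.drop j = c :: r) : j < s.length := by
  by_contra hge
  rw [List.drop_eq_nil_of_le (by omega)] at h
  exact absurd h.symm (List.cons_ne_nil _ _)

lemma bInner_drop (s : List Char) (f : Char) :
    ∀ (cs : List Char) (bal : Int) (j : Nat) (fuel : Nat), s.drop j = cs →
      cs.length < fuel → bInner s f bal j fuel = j + aux f bal cs := by
  intro cs
  induction cs with
  | nil =>
    intro bal j fuel h hf
    have hj : s.length ≤ j := by
      by_contra hlt
      have := List.drop_eq_nil_iff.mp h
      omega
    rcases fuel with _ | fuel
    · omega
    unfold bInner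
    simp [Nat.not_lt.mpr hj, aux]
  | cons c rest ih =>
    intro bal j fuel h hf
    have hj : j < s.length := drop_ne_nil_lt s j c rest h
    have hget : s.getD j ' ' = c := getD_of_drop s j c rest h
    have hrest : s.drop (j + 1) = rest := by
      have : (s.drop j).drop 1 = rest := by rw [h]; rfl
      rwa [List.drop_drop] at this
    rcases fuel with _ | fuel
    · omega
    unfold bInner
    rw [if_pos hj, hget, aux_cons]
    by_cases hz : (if c = f then bal + 1 else bal - 1) = 0
    · rw [if_pos hz, if_pos hz]
      omega
    · rw [if_neg hz, if_neg hz, ih _ _ fuel hrest (by simp at hf ⊢; omega)]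
      omega

-- A's fold from a nonempty buffer: either the scan never balances (one tail chunk
-- pending) or it cuts at offset aux and the fold restarts on the dropped suffix.
lemma scanA (f : Char) :
    ∀ (cs str : List Char) (split : List (List Char)), str ≠ [] → str.headD ' ' = f →
      (aux f (balOf f str) cs = cs.length ∧
        (cs.foldl aStep (split, str)).1 = split ∧ (cs.foldl aStep (split, str)).2 ≠ []) ∨
      (aux f (balOf f str) cs < cs.length ∧ ∃ chunk,
        cs.foldl aStep (split, str)
          = (cs.drop (aux f (balOf f str) cs + 1)).foldl aStep (split ++ [chunk], [])) := by
  intro cs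
  induction cs with
  | nil =>
    intro str split hne _
    exact Or.inl ⟨rfl, rfl, hne⟩
  | cons c cs' ih =>
    intro str split hne hhd
    have hhd' : (str ++ [c]).headD ' ' = f := by
      obtain ⟨hd, tl, rfl⟩ := List.exists_cons_of_ne_nil hne
      simpa using hhd
    have hbal : (if c = f then balOf f str + 1 else balOf f str - 1) = balOf f (str ++ [c]) := by
      unfold balOf
      by_cases hc : c = f <;> simp [List.count_append, hc] <;> omega
    have hcond : ((str ++ [c]).length = 2 * (str ++ [c]).count ((str ++ [c]).headD ' '))
        ↔ balOf f (str ++ [c]) = 0 := by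
      rw [hhd']
      unfold balOf
      omega
    have hstep : aStep (split, str) c =
        if (str ++ [c]).length = 2 * (str ++ [c]).count ((str ++ [c]).headD ' ')
        then (split ++ [str ++ [c]], []) else (split, str ++ [c]) := rfl
    have haux : aux f (balOf f str) (c :: cs')
        = if balOf f (str ++ [c]) = 0 then 0 else 1 + aux f (balOf f (str ++ [c])) cs' := by
      rw [aux_cons, hbal]
    rw [haux, List.foldl_cons, hstep]
    by_cases hz : balOf f (str ++ [c]) = 0
    · rw [if_pos hz, if_pos (hcond.mpr hz)]
      exact Or.inr ⟨by simp, ⟨str ++ [c], by simp⟩⟩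
    · rw [if_neg hz, if_neg (fun hh => hz (hcond.mp hh))]
      rcases ih (str ++ [c]) split (by simp) hhd' with ⟨h1, h2, h3⟩ | ⟨h1, chunk, h2⟩
      · exact Or.inl ⟨by simp [h1]; omega, h2, h3⟩
      · refine Or.inr ⟨by simp; omega, ⟨chunk, ?_⟩⟩
        rw [h2]
        have harith : 1 + aux f (balOf f (str ++ [c])) cs' + 1
            = (aux f (balOf f (str ++ [c])) cs' + 1) + 1 := by omega
        rw [harith, List.drop_succ_cons]

-- A's whole loop (started with an empty buffer) counts split.length + solSpec cs chunks
lemma mainA : ∀ (n : Nat) (cs : List Char), cs.length ≤ n → ∀ (split : List (List Char)),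
    ((cs.foldl aStep (split, [])).1.length : Int)
      + (if (cs.foldl aStep (split, [])).2 ≠ [] then 1 else 0)
      = split.length + solSpec cs := by
  intro n
  induction n with
  | zero =>
    intro cs hlen split
    have : cs = [] := List.eq_nil_of_length_eq_zero (by omega)
    subst this
    simp [solSpec_nil]
  | succ n ih =>
    intro cs hlen split
    rcases cs with _ | ⟨c, cs'⟩
    · simp [solSpec_nil]
    have hfirst : aStep (split, []) c = (split, [c]) := by
      simp [aStep]
    have hbal1 : balOf c [c] = 1 := by simp [balOf]
    have haux : aux c 0 (c :: cs') = 1 + aux c 1 cs' := by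
      rw [aux_cons]
      simp
    rw [List.foldl_cons, hfirst]
    rcases scanA c cs' [c] split (by simp) (by simp) with ⟨h1, h2, h3⟩ | ⟨h1, chunk, h2⟩
    · rw [hbal1] at h1
      rw [h2, if_pos h3]
      have hdrop : (c :: cs').drop (aux c 0 (c :: cs') + 1) = [] := by
        rw [haux, h1]
        simp
      rw [solSpec_cons, hdrop, solSpec_nil]
      ring
    · rw [hbal1] at h1 h2
      rw [h2]
      have hlen' : (cs'.drop (aux c 1 cs' + 1)).length ≤ n := by
        simp only [List.length_drop]
        simp at hlen
        omega
      rw [ih (cs'.drop (aux c 1 cs' + 1)) hlen' (split ++ [chunk])]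
      have hdrop : (c :: cs').drop (aux c 0 (c :: cs') + 1) = cs'.drop (aux c 1 cs' + 1) := by
        rw [haux]
        have : 1 + aux c 1 cs' + 1 = (aux c 1 cs' + 1) + 1 := by omega
        rw [this, List.drop_succ_cons]
      rw [solSpec_cons, hdrop]
      simp
      ring

-- B's outer loop from index i counts answer + solSpec (s.drop i) chunks
lemma mainB : ∀ (n : Nat) (cs : List Char), cs.length ≤ n →
    ∀ (s : List Char) (i : Nat) (answer : Int) (fuel : Nat), s.drop i = cs →
      cs.length < fuel → bOuter s answer i fuel = answer + solSpec cs := by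
  intro n
  induction n with
  | zero =>
    intro cs hlen s i answer fuel h hf
    have : cs = [] := List.eq_nil_of_length_eq_zero (by omega)
    subst this
    have hge : s.length ≤ i := by
      by_contra hlt
      have := List.drop_eq_nil_iff.mp h
      omega
    rcases fuel with _ | fuel
    · omega
    unfold bOuter
    simp [Nat.not_lt.mpr hge, solSpec_nil]
  | succ n ih =>
    intro cs hlen s i answer fuel h hf
    rcases cs with _ | ⟨c, cs'⟩
    · have hge : s.length ≤ i := by
        by_contra hlt
        have := List.drop_eq_nil_iff.mp h
        omega
      rcases fuel with _ | fuel
      · omega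
      unfold bOuter
      simp [Nat.not_lt.mpr hge, solSpec_nil]
    · have hi : i < s.length := drop_ne_nil_lt s i c cs' h
      have hget : s.getD i ' ' = c := getD_of_drop s i c cs' h
      have hinner : bInner s c 0 i (s.length + 1) = i + aux c 0 (c :: cs') :=
        bInner_drop s c _ 0 i (s.length + 1) h
          (by have := h ▸ (List.length_drop (l := s) (i := i)); simp at this ⊢; omega)
      have hdrop2 : s.drop (i + aux c 0 (c :: cs') + 1)
          = (c :: cs').drop (aux c 0 (c :: cs') + 1) := by
        rw [← h, List.drop_drop]
        congr 1
      have hlen' : ((c :: cs').drop (aux c 0 (c :: cs') + 1)).length ≤ n := by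
        simp only [List.length_drop, List.length_cons]
        simp at hlen
        omega
      rcases fuel with _ | fuel
      · omega
      unfold bOuter
      rw [if_pos hi]
      simp only [hget, hinner]
      have hf' : ((c :: cs').drop (aux c 0 (c :: cs') + 1)).length < fuel := by
        simp only [List.length_drop, List.length_cons]
        simp at hf
        omega
      rw [ih _ hlen' s _ (answer + 1) fuel (by rw [← hdrop2]) hf']
      rw [solSpec_cons]
      ring

-- ===== VERDICT (by name: the statement is the Claim_ definition above) =====
theorem solution_spec : Claim_equal_solution := by
  intro s _
  unfold Spec_solution solution solution_alt
  have hA := mainA s.toList.length s.toList le_rfl []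
  have hB := mainB s.toList.length s.toList le_rfl s.toList 0 0 (s.toList.length + 1) (by simp) (by omega)
  rw [hB]
  set fin := s.toList.foldl aStep ([], []) with hfin
  by_cases hne : fin.2 = []
  · simp only [hne, ne_eq, not_true_eq_false, if_false] at hA
    simp only [List.length_nil, Nat.cast_zero, zero_add] at hA
    simp [hne, ← hA]
  · have hpos : fin.2.length > 0 := List.length_pos_iff.mpr hne
    simp only [ne_eq, hne, not_false_eq_true, if_true] at hA
    simp only [List.length_nil, Nat.cast_zero, zero_add] at hA
    simp [hpos, ← hA]
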